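-- pv_equiv track=rewrite | github.com/owencqueen/final_project_302 | old_files/johnPythonPractice/stringMath.py | string_assim
-- ===== SOURCE A (Python) =====
-- def string_assim(arg):
--
-- 	val1 = arg[0]
-- 	val2 = arg[1]
--
--
-- 	if len(val1) > len(val2):
-- 		val1 = '0' + val1
-- 		sz = len(val1)
-- 	else:
-- 		val2 = '0' + val2
-- 		sz = len(val2)
--
-- 	while len(val1) != len(val2):
-- 		if len(val1) > len(val2):
-- 			val2 = '0' + val2
-- 		else:
-- 			val1 = '0' + val1
--
-- 	return val1, val2, sz
-- ===== SOURCE B (Python) =====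
-- def string_assim(arg):
--     val1, val2 = arg
--     sz = max(len(val1), len(val2)) + 1
--     return '0' * (sz - len(val1)) + val1, '0' * (sz - len(val2)) + val2, sz
-- ===== Notes on version B (the rewrite author's own statement) =====
-- stated objective: simpler
-- what changed: Replaces the prepend-one-'0'-at-a-time while loop with a closed-form target length L = max(len1,len2)+1 and two direct left-pads '0'*(L-len)+val.
import Mathlib
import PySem

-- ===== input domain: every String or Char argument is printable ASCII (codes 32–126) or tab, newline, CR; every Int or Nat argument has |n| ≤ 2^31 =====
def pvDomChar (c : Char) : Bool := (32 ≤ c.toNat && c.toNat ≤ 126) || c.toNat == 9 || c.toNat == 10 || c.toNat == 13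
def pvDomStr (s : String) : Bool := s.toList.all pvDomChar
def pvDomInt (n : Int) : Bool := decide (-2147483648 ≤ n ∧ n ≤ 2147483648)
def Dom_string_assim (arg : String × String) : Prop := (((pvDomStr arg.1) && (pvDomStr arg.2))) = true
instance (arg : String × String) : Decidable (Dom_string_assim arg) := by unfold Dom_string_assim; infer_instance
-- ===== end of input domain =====

-- B replaces A's prepend-one-'0'-at-a-time while loop by a closed-form target length and two direct pads (simpler).

-- ===== PORT A =====
-- A's while loop: while len(v1) != len(v2), prepend '0' to the shorter string.
def saLoop (v1 v2 : List Char) : List Char × List Char :=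
  if v1.length ≠ v2.length then
    if v1.length > v2.length then saLoop v1 ('0' :: v2)
    else saLoop ('0' :: v1) v2
  else (v1, v2)
termination_by (v1.length - v2.length) + (v2.length - v1.length)
decreasing_by all_goals simp_all; omega

def string_assim (arg : String × String) : String × String × Int :=
  let val1 := arg.1.toList
  let val2 := arg.2.toList
  if val1.length > val2.length then
    let val1' := '0' :: val1
    let sz : Int := val1'.length
    let r := saLoop val1' val2
    (String.ofList r.1, String.ofList r.2, sz)
  else
    let val2' := '0' :: val2
    let sz : Int := val2'.length
    let r := saLoop val1 val2'
    (String.ofList r.1, String.ofList r.2, sz)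

-- ===== PORT B =====
def string_assim_alt (arg : String × String) : String × String × Int :=
  let l1 := arg.1.toList
  let l2 := arg.2.toList
  let L := max l1.length l2.length + 1
  (String.ofList (List.replicate (L - l1.length) '0' ++ l1),
   String.ofList (List.replicate (L - l2.length) '0' ++ l2),
   (L : Int))

-- ===== PRECONDITION & SPEC =====
def Spec_string_assim (arg : String × String) (out : String × String × Int) : Prop := out = string_assim_alt arg
instance (arg : String × String) (out : String × String × Int) : Decidable (Spec_string_assim arg out) := by unfold Spec_string_assim; infer_instance

-- ===== CLAIM (what is proved, stated in full; the proofs are below) =====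
def Claim_equal_string_assim : Prop := ∀ (arg : String × String), Dom_string_assim arg → Spec_string_assim arg (string_assim arg)

-- ===== LEMMAS AND PROOFS =====
theorem saLoop_right (n : Nat) : ∀ (v1 v2 : List Char), v1.length = v2.length + n →
    saLoop v1 v2 = (v1, List.replicate n '0' ++ v2) := by
  induction n with
  | zero =>
    intro v1 v2 h
    rw [saLoop]
    simp [h]
  | succ n ih =>
    intro v1 v2 h
    rw [saLoop]
    have h1 : v1.length ≠ v2.length := by omega
    have h2 : v1.length > v2.length := by omega
    rw [if_pos (by simpa using h1), if_pos h2]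
    rw [ih v1 ('0' :: v2) (by simp; omega)]
    simp [List.replicate_succ']

theorem saLoop_left (n : Nat) : ∀ (v1 v2 : List Char), v2.length = v1.length + n →
    saLoop v1 v2 = (List.replicate n '0' ++ v1, v2) := by
  induction n with
  | zero =>
    intro v1 v2 h
    rw [saLoop]
    simp [h]
  | succ n ih =>
    intro v1 v2 h
    rw [saLoop]
    have h1 : v1.length ≠ v2.length := by omega
    have h2 : ¬ v1.length > v2.length := by omega
    rw [if_pos (by simpa using h1), if_neg h2]
    rw [ih ('0' :: v1) v2 (by simp; omega)]
    simp [List.replicate_succ']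

-- ===== VERDICT (by name: the statement is the Claim_ definition above) =====
theorem string_assim_spec : Claim_equal_string_assim := by
  intro arg _
  unfold Spec_string_assim string_assim string_assim_alt
  set l1 := arg.1.toList with hl1
  set l2 := arg.2.toList with hl2
  by_cases h : l1.length > l2.length
  · simp only [h, if_true]
    rw [saLoop_right (l1.length + 1 - l2.length) ('0' :: l1) l2 (by simp; omega)]
    have hm : max l1.length l2.length = l1.length := by omega
    have h1 : max l1.length l2.length + 1 - l1.length = 1 := by omega
    simp [hm, h1, List.replicate_succ]
  · simp only [h, if_false]
    rw [saLoop_left (l2.length + 1 - l1.length) l1 ('0' :: l2) (by simp; omega)]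
    have hm : max l1.length l2.length = l2.length := by omega
    have h1 : max l1.length l2.length + 1 - l2.length = 1 := by omega
    simp [hm, h1, List.replicate_succ]
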